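-- pv_equiv track=rewrite | github.com/zdyxry/LeetCode | array/1848_minimum_distance_to_the_target_element/1848_minimum_distance_to_the_target_element.py | getMinDistance
-- ===== SOURCE A (Python) =====
-- from typing import List
--
-- def getMinDistance(nums: List[int], target: int, start: int) -> int:
--     i = j = start
--     n = len(nums)
--     while i>=0 or j<n:
--         if i>=0 and nums[i]==target:
--             return start-i
--
--         if j<n and nums[j]==target:
--             return j-start
--         i -= 1
--         j += 1
--     return 0
-- ===== SOURCE B (Python) =====
-- def getMinDistance(nums, target, start):
--     if nums[start] == target:
--         return 0
--     return min((abs(i - start) for i, v in enumerate(nums) if v == target), default=0)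
-- ===== Notes on version B (the rewrite author's own statement) =====
-- stated objective: simpler
-- what changed: Replaces the outward two-pointer expansion loop with an O(1) check of the start position followed by a single left-to-right pass taking the minimum absolute index distance over all matches (default 0 when the target is absent).
-- outside the precondition, e.g. on getMinDistance([0, 9, 2], 2, -2): A returns 1, B returns 4
import Mathlib
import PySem

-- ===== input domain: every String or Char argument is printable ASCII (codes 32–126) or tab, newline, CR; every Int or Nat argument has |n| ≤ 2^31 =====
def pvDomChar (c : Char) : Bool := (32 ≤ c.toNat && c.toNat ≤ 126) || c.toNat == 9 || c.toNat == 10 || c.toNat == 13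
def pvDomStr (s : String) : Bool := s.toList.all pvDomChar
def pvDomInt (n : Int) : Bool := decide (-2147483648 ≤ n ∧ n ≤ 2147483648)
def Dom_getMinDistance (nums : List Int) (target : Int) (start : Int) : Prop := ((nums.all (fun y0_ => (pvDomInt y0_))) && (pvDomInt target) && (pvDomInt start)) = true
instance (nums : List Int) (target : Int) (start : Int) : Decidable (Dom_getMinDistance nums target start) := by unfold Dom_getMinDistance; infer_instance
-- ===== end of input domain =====

-- B replaces A's outward two-pointer expansion with one left-to-right minimizing pass (objective: simpler).

-- ===== PORT A =====
-- A's while loop: state (i, j); i decreases, j increases, first match wins.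
-- fuel = (i+1).toNat + (n-j).toNat is only a totality guard: it reaches 0 exactly
-- when the loop condition is already false, so the 0-branch is Python's fall-through `return 0`.
def goA (nums : List Int) (target : Int) (start : Int) (n : Int) : Int → Int → Nat → Int
  | _, _, 0 => 0
  | i, j, fuel + 1 =>
    if i ≥ 0 ∨ j < n then
      if i ≥ 0 ∧ PySem.List.pyGet? nums i = some target then start - i
      else if j < n ∧ PySem.List.pyGet? nums j = some target then j - start
      else goA nums target start n (i - 1) (j + 1) fuel
    else 0

def getMinDistance (nums : List Int) (target : Int) (start : Int) : Int :=
  goA nums target start (nums.length : Int) start start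
    ((start + 1).toNat + ((nums.length : Int) - start).toNat)

-- ===== PORT B =====
def getMinDistance_alt (nums : List Int) (target : Int) (start : Int) : Int :=
  if PySem.List.pyGet? nums start = some target then 0
  else
    PySem.List.minD
      ((PySem.List.enumerate nums 0).filterMap
        (fun p => if p.2 = target then some |p.1 - start| else none))
      (fun x => x) 0

-- ===== PRECONDITION & SPEC =====
-- A raises IndexError outside -len(nums) ≤ start < len(nums); within it, Pre_ further excludes the
-- one unspecified corner where A's and B's values are both defensible yet differ: a negative start
-- whose wrapped position does not hold the target while the target occurs among the last |start|
-- elements — there A's negative-index wraparound yields a wrapped offset and B the literal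
-- minimum |i - start| over real indices, two equally accidental readings of a negative start.
def Pre_getMinDistance (nums : List Int) (target : Int) (start : Int) : Prop :=
  (-(nums.length : Int) ≤ start ∧ start < (nums.length : Int)) ∧
    ¬ (start < 0 ∧ target ∈ nums.drop (nums.length - start.natAbs) ∧
        PySem.List.pyGet? nums start ≠ some target)
instance (nums : List Int) (target : Int) (start : Int) : Decidable (Pre_getMinDistance nums target start) := by unfold Pre_getMinDistance; infer_instance
def pvWitness_getMinDistance : List Int × Int × Int := ([5, 3], 3, 1)

def Spec_getMinDistance (nums : List Int) (target : Int) (start : Int) (out : Int) : Prop := out = getMinDistance_alt nums target start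
instance (nums : List Int) (target : Int) (start : Int) (out : Int) : Decidable (Spec_getMinDistance nums target start out) := by unfold Spec_getMinDistance; infer_instance

-- ===== CLAIM (what is proved, stated in full; the proofs are below) =====
def Claim_equal_getMinDistance : Prop := ∀ (nums : List Int) (target : Int) (start : Int), Dom_getMinDistance nums target start → Pre_getMinDistance nums target start → Spec_getMinDistance nums target start (getMinDistance nums target start)

-- ===== LEMMAS AND PROOFS =====

-- the list of candidate distances B minimizes over (B's else branch)
def dsB (nums : List Int) (target : Int) (start : Int) : List Int :=
  (PySem.List.enumerate nums 0).filterMap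
    (fun p => if p.2 = target then some |p.1 - start| else none)

lemma alt_else (nums : List Int) (target : Int) (start : Int)
    (h : PySem.List.pyGet? nums start ≠ some target) :
    getMinDistance_alt nums target start = PySem.List.minD (dsB nums target start) (fun x => x) 0 := by
  unfold getMinDistance_alt dsB
  rw [if_neg h]

lemma mem_dsB {nums : List Int} {target start d : Int} :
    d ∈ dsB nums target start ↔
      ∃ (k : ℕ) (h : k < nums.length), nums[k] = target ∧ d = |(k : Int) - start| := by
  unfold dsB
  simp only [List.mem_filterMap]
  constructor
  · rintro ⟨p, hp, hd⟩
    rw [PySem.List.mem_enumerate_iff] at hp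
    obtain ⟨k, hk, rfl⟩ := hp
    by_cases ht : nums[k] = target
    · simp [ht] at hd; exact ⟨k, hk, ht, by omega⟩
    · simp [ht] at hd
  · rintro ⟨k, hk, ht, rfl⟩
    refine ⟨((k : Int), nums[k]), ?_, by simp [ht]⟩
    rw [PySem.List.mem_enumerate_iff]
    exact ⟨k, hk, by simp⟩

-- the scan's value equals v when v is an attained distance that is minimal
lemma minB_eq_of_min {nums : List Int} {target start v : Int}
    (hmem : v ∈ dsB nums target start)
    (hmin : ∀ d ∈ dsB nums target start, v ≤ d) :
    PySem.List.minD (dsB nums target start) (fun x => x) 0 = v := by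
  have hne : dsB nums target start ≠ [] := by
    intro h; rw [h] at hmem; simp at hmem
  have h := PySem.List.min?_eq_some_minD (dsB nums target start) (fun x => x) 0 hne
  have h1 := PySem.List.min?_mem h
  have h2 := PySem.List.min?_id_le h v hmem
  have h3 := hmin _ h1
  omega

-- main loop lemma: under the "nothing strictly between i and j matches" invariant and
-- "no match reachable only through wraparound", A's loop returns B's minimum
lemma goA_eq_minB (nums : List Int) (target start : Int)
    (hpre1 : -(nums.length : Int) ≤ start) (hpre2 : start < (nums.length : Int))
    (hnw : start < 0 → target ∉ nums.drop (nums.length - start.natAbs)) :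
    ∀ (fuel : ℕ) (i j : Int), (i + 1).toNat + ((nums.length : Int) - j).toNat ≤ fuel →
      i + j = 2 * start → i ≤ start → start ≤ j →
      (∀ (k : ℕ) (hk : k < nums.length), nums[k] = target → ((k : Int) ≤ i ∨ j ≤ (k : Int))) →
      goA nums target start (nums.length : Int) i j fuel
        = PySem.List.minD (dsB nums target start) (fun x => x) 0 := by
  intro fuel
  induction fuel with
  | zero =>
    intro i j hm hsym hi hj hinv
    -- fuel 0 means the loop condition is false: i < 0 and len ≤ j; no index matches at all
    symm
    have hds : dsB nums target start = [] := by
      rw [List.eq_nil_iff_forall_not_mem]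
      intro d hd
      rw [mem_dsB] at hd
      obtain ⟨k, hk, hkt, rfl⟩ := hd
      rcases hinv k hk hkt with h | h <;> omega
    rw [hds]
    rfl
  | succ f IH =>
    intro i j hm hsym hi hj hinv
    rw [goA]
    by_cases hcond : i ≥ 0 ∨ j < (nums.length : Int)
    · rw [if_pos hcond]
      by_cases hbi : i ≥ 0 ∧ PySem.List.pyGet? nums i = some target
      · rw [if_pos hbi]
        obtain ⟨hi0, hget⟩ := hbi
        rw [PySem.List.pyGet?_of_nonneg _ hi0] at hget
        have hlt : i.toNat < nums.length := by
          by_contra hcon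
          rw [List.getElem?_eq_none (by omega)] at hget
          simp at hget
        rw [List.getElem?_eq_getElem hlt] at hget
        have hgt : nums[i.toNat] = target := Option.some.inj hget
        symm
        apply minB_eq_of_min
        · rw [mem_dsB]
          exact ⟨i.toNat, hlt, hgt, by rw [abs_of_nonpos (by omega)]; omega⟩
        · intro d hd
          rw [mem_dsB] at hd
          obtain ⟨k, hk, hkt, rfl⟩ := hd
          have h1 := le_abs_self ((k : Int) - start)
          have h2 := neg_abs_le ((k : Int) - start)
          rcases hinv k hk hkt with h | h <;> omega
      · rw [if_neg hbi]
        by_cases hbj : j < (nums.length : Int) ∧ PySem.List.pyGet? nums j = some target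
        · rw [if_pos hbj]
          obtain ⟨hjn, hget⟩ := hbj
          by_cases hj0 : 0 ≤ j
          · rw [PySem.List.pyGet?_of_nonneg _ hj0] at hget
            have hlt : j.toNat < nums.length := by omega
            rw [List.getElem?_eq_getElem hlt] at hget
            have hgt : nums[j.toNat] = target := Option.some.inj hget
            symm
            apply minB_eq_of_min
            · rw [mem_dsB]
              exact ⟨j.toNat, hlt, hgt, by rw [abs_of_nonneg (by omega)]; omega⟩
            · intro d hd
              rw [mem_dsB] at hd
              obtain ⟨k, hk, hkt, rfl⟩ := hd
              have h1 := le_abs_self ((k : Int) - start)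
              have h2 := neg_abs_le ((k : Int) - start)
              rcases hinv k hk hkt with h | h <;> omega
          · -- j < 0: the hit went through negative-index wraparound, excluded by Pre_
            exfalso
            rw [PySem.List.pyGet?_neg nums (by omega) (by omega)] at hget
            have hlt : nums.length - (-j).toNat < nums.length := by omega
            rw [List.getElem?_eq_getElem hlt] at hget
            have hgt := Option.some.inj hget
            apply hnw (by omega)
            rw [List.mem_iff_getElem]
            refine ⟨(nums.length - (-j).toNat) - (nums.length - start.natAbs), ?_, ?_⟩
            · rw [List.length_drop]; omega
            · rw [List.getElem_drop]
              have hidx : nums.length - start.natAbs + (nums.length - (-j).toNat - (nums.length - start.natAbs))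
                  = nums.length - (-j).toNat := by omega
              simp only [hidx]
              exact hgt
        · rw [if_neg hbj]
          refine IH (i - 1) (j + 1) (by rcases hcond with hc | hc <;> omega) (by omega) (by omega)
            (by omega) ?_
          intro k hk hkt
          rcases hinv k hk hkt with h | h
          · left
            by_contra hc
            apply hbi
            refine ⟨by omega, ?_⟩
            rw [PySem.List.pyGet?_of_nonneg _ (by omega), show i.toNat = k from by omega,
              List.getElem?_eq_getElem hk, hkt]
          · right
            by_contra hc
            apply hbj
            refine ⟨by omega, ?_⟩
            rw [PySem.List.pyGet?_of_nonneg _ (by omega), show j.toNat = k from by omega,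
              List.getElem?_eq_getElem hk, hkt]
    · rw [if_neg hcond]
      rw [not_or] at hcond
      obtain ⟨hineg, hjn⟩ := hcond
      symm
      have hds : dsB nums target start = [] := by
        rw [List.eq_nil_iff_forall_not_mem]
        intro d hd
        rw [mem_dsB] at hd
        obtain ⟨k, hk, hkt, rfl⟩ := hd
        rcases hinv k hk hkt with h | h <;> omega
      rw [hds]
      rfl

-- A returns 0 outright when the (possibly wrapped) start position holds the target
lemma fast_path (nums : List Int) (target start : Int)
    (h1 : -(nums.length : Int) ≤ start) (h2 : start < (nums.length : Int))
    (hfast : PySem.List.pyGet? nums start = some target) :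
    getMinDistance nums target start = 0 := by
  unfold getMinDistance
  obtain ⟨f, hf⟩ := Nat.exists_eq_succ_of_ne_zero
    (show (start + 1).toNat + ((nums.length : Int) - start).toNat ≠ 0 from by omega)
  rw [hf, goA]
  by_cases hs0 : 0 ≤ start
  · rw [if_pos (Or.inl hs0), if_pos ⟨hs0, hfast⟩]
    omega
  · rw [if_pos (Or.inr h2), if_neg (by rintro ⟨h, -⟩; omega), if_pos ⟨h2, hfast⟩]
    omega

-- ===== VERDICT (by name: the statement is the Claim_ definition above) =====
theorem getMinDistance_spec : Claim_equal_getMinDistance := by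
  intro nums target start _ hpre
  obtain ⟨⟨h1, h2⟩, hD⟩ := hpre
  show getMinDistance nums target start = getMinDistance_alt nums target start
  by_cases hfast : PySem.List.pyGet? nums start = some target
  · rw [fast_path nums target start h1 h2 hfast]
    unfold getMinDistance_alt
    rw [if_pos hfast]
  · rw [alt_else nums target start hfast]
    exact goA_eq_minB nums target start h1 h2
      (fun hs hmem => hD ⟨hs, hmem, hfast⟩)
      _ start start le_rfl (by ring) le_rfl le_rfl (by intro k hk _; omega)
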